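-- pv_equiv track=rewrite | github.com/galaxyproject/galaxy | lib/galaxy/containers/docker_model.py | split_constraint_string
-- ===== SOURCE A (Python) =====
-- def split_constraint_string(constraint_str):
--     constraint = (constraint_str, '', '')
--     for op in '==', '!=':
--         t = constraint_str.partition(op)
--         if len(t[0]) < len(constraint[0]):
--             constraint = t
--     if constraint[0] == constraint_str:
--         raise Exception('Unable to parse constraint string: %s' % constraint_str)
--     return [x.strip() for x in constraint]
-- ===== SOURCE B (Python) =====
-- def split_constraint_string(constraint_str):
--     # single left-to-right scan for the leftmost '==' or '!=' window
--     for i in range(len(constraint_str) - 1):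
--         two = constraint_str[i:i + 2]
--         if two == '==' or two == '!=':
--             return [constraint_str[:i].strip(), two, constraint_str[i + 2:].strip()]
--     raise Exception('Unable to parse constraint string: %s' % constraint_str)
-- ===== Notes on version B (the rewrite author's own statement) =====
-- stated objective: simpler
-- what changed: B makes one left-to-right scan for the leftmost '==' or '!=' window and splits there directly, instead of A's two separate str.partition scans whose results are compared by prefix length.
import Mathlib
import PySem

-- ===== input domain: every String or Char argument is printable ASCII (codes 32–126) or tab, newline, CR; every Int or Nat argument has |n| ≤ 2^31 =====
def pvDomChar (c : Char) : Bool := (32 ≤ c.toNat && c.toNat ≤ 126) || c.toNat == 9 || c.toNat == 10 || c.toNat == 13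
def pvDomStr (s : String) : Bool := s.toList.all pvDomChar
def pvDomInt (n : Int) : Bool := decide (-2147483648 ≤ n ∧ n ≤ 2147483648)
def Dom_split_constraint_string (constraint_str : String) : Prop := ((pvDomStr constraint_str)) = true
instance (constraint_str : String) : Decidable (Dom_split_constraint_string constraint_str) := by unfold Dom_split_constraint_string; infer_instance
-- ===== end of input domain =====

-- B replaces A's two str.partition scans plus prefix-length comparison by one
-- left-to-right scan that splits at the leftmost '==' or '!=' window (objective: simpler).

-- ===== PORT A =====
-- str.partition(op) for a two-character op, on code points
def pyPartition2 : List Char → Char → Char → List Char × List Char × List Char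
  | [], _, _ => ([], [], [])
  | [a], _, _ => ([a], [], [])
  | a :: b :: rest, c1, c2 =>
    if a = c1 ∧ b = c2 then ([], [c1, c2], rest)
    else
      let t := pyPartition2 (b :: rest) c1 c2
      (a :: t.1, t.2.1, t.2.2)

def split_constraint_string (constraint_str : String) : List String :=
  let cs := constraint_str.toList
  let constraint0 := (cs, ([] : List Char), ([] : List Char))
  let t1 := pyPartition2 cs '=' '='
  let constraint1 := if t1.1.length < constraint0.1.length then t1 else constraint0
  let t2 := pyPartition2 cs '!' '='
  let constraint2 := if t2.1.length < constraint1.1.length then t2 else constraint1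
  if constraint2.1 = cs then []  -- Python raises Exception here; excluded by Pre_
  else [String.ofList (PySem.Chars.strip constraint2.1),
        String.ofList (PySem.Chars.strip constraint2.2.1),
        String.ofList (PySem.Chars.strip constraint2.2.2)]

-- ===== PORT B =====
-- B's loop: first index whose two-char window is '==' or '!='; returns (prefix, op, suffix)
def scanOp : List Char → Option (List Char × List Char × List Char)
  | [] => none
  | a :: rest =>
    match rest with
    | [] => none
    | b :: rest' =>
      if (a = '=' ∨ a = '!') ∧ b = '=' then some ([], [a, '='], rest')
      else (scanOp (b :: rest')).map fun t => (a :: t.1, t.2.1, t.2.2)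

def split_constraint_string_alt (constraint_str : String) : List String :=
  match scanOp constraint_str.toList with
  | none => []  -- Python raises Exception here; excluded by Pre_
  | some (p, o, suf) =>
      [String.ofList (PySem.Chars.strip p), String.ofList o,
       String.ofList (PySem.Chars.strip suf)]

-- ===== PRECONDITION & SPEC =====
-- Pre_ excludes exactly the strings containing neither '==' nor '!=',
-- on which Python A (and B) raises Exception.
def Pre_split_constraint_string (constraint_str : String) : Prop :=
  ['=', '='] <:+: constraint_str.toList ∨ ['!', '='] <:+: constraint_str.toList
instance (constraint_str : String) : Decidable (Pre_split_constraint_string constraint_str) := by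
  unfold Pre_split_constraint_string; infer_instance
def pvWitness_split_constraint_string : String := "a == b"

def Spec_split_constraint_string (constraint_str : String) (out : List String) : Prop := out = split_constraint_string_alt constraint_str
instance (constraint_str : String) (out : List String) : Decidable (Spec_split_constraint_string constraint_str out) := by unfold Spec_split_constraint_string; infer_instance

-- ===== CLAIM (what is proved, stated in full; the proofs are below) =====
def Claim_equal_split_constraint_string : Prop := ∀ (constraint_str : String), Dom_split_constraint_string constraint_str → Pre_split_constraint_string constraint_str → Spec_split_constraint_string constraint_str (split_constraint_string constraint_str)

-- ===== LEMMAS AND PROOFS =====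

-- If B's scan finds nothing, neither operator occurs as an infix.
theorem scanOp_none_no_infix : ∀ cs : List Char, scanOp cs = none →
    ¬ (['=', '='] <:+: cs ∨ ['!', '='] <:+: cs) := by
  intro cs
  induction cs with
  | nil => intro _ h; rcases h with h | h <;> simp at h
  | cons a rest ih =>
    cases rest with
    | nil =>
      intro _ h
      rcases h with h | h <;> exact absurd h.length_le (by simp)
    | cons b rest' =>
      intro hs h
      simp only [scanOp] at hs
      split at hs
      · exact absurd hs (by simp)
      · rename_i hcond
        have hrec : scanOp (b :: rest') = none := by
          cases hrec : scanOp (b :: rest') <;> simp [hrec] at hs ⊢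
        rcases h with h | h <;>
          rcases List.infix_cons_iff.mp h with hpre | hinf
        · rcases List.cons_prefix_cons.mp hpre with ⟨ha, hpre2⟩
          rcases List.cons_prefix_cons.mp hpre2 with ⟨hb, _⟩
          exact hcond ⟨Or.inl ha.symm, hb.symm⟩
        · exact ih hrec (Or.inl hinf)
        · rcases List.cons_prefix_cons.mp hpre with ⟨ha, hpre2⟩
          rcases List.cons_prefix_cons.mp hpre2 with ⟨hb, _⟩
          exact hcond ⟨Or.inr ha.symm, hb.symm⟩
        · exact ih hrec (Or.inr hinf)

-- Core correspondence between B's single scan and A's two partitions: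
-- the found split is the partition at the found operator, and the other
-- operator's partition has a strictly longer prefix.
theorem scanOp_some_partition : ∀ (cs p o suf : List Char), scanOp cs = some (p, o, suf) →
    p.length < cs.length ∧
    ((o = ['=', '='] ∧ pyPartition2 cs '=' '=' = (p, o, suf) ∧
        p.length < (pyPartition2 cs '!' '=').1.length) ∨
     (o = ['!', '='] ∧ pyPartition2 cs '!' '=' = (p, o, suf) ∧
        p.length < (pyPartition2 cs '=' '=').1.length)) := by
  intro cs
  induction cs with
  | nil => intro p o suf h; simp [scanOp] at h
  | cons a rest ih =>
    cases rest with
    | nil => intro p o suf h; simp [scanOp] at h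
    | cons b rest' =>
      intro p o suf h
      simp only [scanOp] at h
      split at h
      · rename_i hcond
        obtain ⟨ha, hb⟩ := hcond
        rcases ha with ha | ha <;>
        · injection h with h'
          injection h' with h1 h2
          injection h2 with h2 h3
          subst h1 h2 h3 ha hb
          refine ⟨by simp, ?_⟩
          first
          | exact Or.inl ⟨rfl, by simp [pyPartition2], by simp [pyPartition2]⟩
          | exact Or.inr ⟨rfl, by simp [pyPartition2], by simp [pyPartition2]⟩
      · rename_i hcond
        obtain ⟨⟨p', o', suf'⟩, hrec, heq⟩ := Option.map_eq_some_iff.mp h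
        simp only [Prod.mk.injEq] at heq
        obtain ⟨h1, h2, h3⟩ := heq
        subst h2 h3
        obtain ⟨hlen, hcase⟩ := ih p' o' suf' hrec
        have hne1 : ¬ (a = '=' ∧ b = '=') := fun ⟨x, y⟩ => hcond ⟨Or.inl x, y⟩
        have hne2 : ¬ (a = '!' ∧ b = '=') := fun ⟨x, y⟩ => hcond ⟨Or.inr x, y⟩
        subst h1
        constructor
        · simpa using Nat.succ_lt_succ hlen
        · rcases hcase with ⟨ho, hp, hl⟩ | ⟨ho, hp, hl⟩
          · exact Or.inl ⟨ho, by simp [pyPartition2, hne1, hp], by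
              simp only [pyPartition2, if_neg hne2]
              simpa using Nat.succ_lt_succ hl⟩
          · exact Or.inr ⟨ho, by simp [pyPartition2, hne2, hp], by
              simp only [pyPartition2, if_neg hne1]
              simpa using Nat.succ_lt_succ hl⟩

theorem main_eq (s : String)
    (hpre : ['=', '='] <:+: s.toList ∨ ['!', '='] <:+: s.toList) :
    split_constraint_string s = split_constraint_string_alt s := by
  cases h : scanOp s.toList with
  | none => exact absurd hpre (scanOp_none_no_infix _ h)
  | some t =>
    obtain ⟨p, o, suf⟩ := t
    obtain ⟨hlen, hc⟩ := scanOp_some_partition _ _ _ _ h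
    have hne : p ≠ s.toList := fun he => by
      have := congrArg List.length he; omega
    rcases hc with ⟨ho, hp, hl⟩ | ⟨ho, hp, hl⟩ <;> subst ho
    · simp only [split_constraint_string, split_constraint_string_alt, h, hp,
        if_pos hlen, if_neg (by omega : ¬ (pyPartition2 s.toList '!' '=').1.length < p.length),
        if_neg hne]
      simp [show PySem.Chars.strip ['=', '='] = ['=', '='] from by decide]
    · by_cases h1 : (pyPartition2 s.toList '=' '=').1.length < s.toList.length
      · simp only [split_constraint_string, split_constraint_string_alt, h, hp,
          if_pos h1, if_pos hl, if_neg hne]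
        simp [show PySem.Chars.strip ['!', '='] = ['!', '='] from by decide]
      · simp only [split_constraint_string, split_constraint_string_alt, h, hp,
          if_neg h1]
        have hlen' : p.length < s.length := by simpa using hlen
        simp [hlen', hne, show PySem.Chars.strip ['!', '='] = ['!', '='] from by decide]

-- ===== VERDICT (by name: the statement is the Claim_ definition above) =====
theorem split_constraint_string_spec : Claim_equal_split_constraint_string := by
  intro s _ hpre
  exact main_eq s hpre
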